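-- pv_equiv track=rewrite | github.com/Jcarbonell04/simple-cataract-simulator-py | simple-cataract-sim-text/main.py | haze_text
-- ===== SOURCE A (Python) =====
-- def haze_text(text, severity=1):
--     """
--     Replace some letters with dots to simulate haze/faded vision
--     :param text: The input text to haze
--     :param severity: How many letters to replace with dots
--     :return: The hazy text
--     """
--     newText = ""
--     for char in text:
--         if char.isalpha() and severity > 0:
--             newText += "."
--             severity -= 1
--         else:
--             newText += char
--     return newText
-- ===== SOURCE B (Python) =====
-- def haze_text(text, severity=1):
--     # Locate the boundary after the first `severity` letters, then splice:
--     # dotted prefix + untouched suffix.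
--     remaining = severity
--     boundary = len(text)
--     if remaining <= 0:
--         boundary = 0
--     else:
--         for i, ch in enumerate(text):
--             if ch.isalpha():
--                 remaining -= 1
--                 if remaining == 0:
--                     boundary = i + 1
--                     break
--     return "".join("." if c.isalpha() else c for c in text[:boundary]) + text[boundary:]
-- ===== Notes on version B (the rewrite author's own statement) =====
-- stated objective: alternative
-- what changed: A interleaves the severity countdown and output building in one character loop; B first locates the boundary index after the severity-th letter, then builds the output as a dotted prefix spliced with the untouched suffix.
import Mathlib
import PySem

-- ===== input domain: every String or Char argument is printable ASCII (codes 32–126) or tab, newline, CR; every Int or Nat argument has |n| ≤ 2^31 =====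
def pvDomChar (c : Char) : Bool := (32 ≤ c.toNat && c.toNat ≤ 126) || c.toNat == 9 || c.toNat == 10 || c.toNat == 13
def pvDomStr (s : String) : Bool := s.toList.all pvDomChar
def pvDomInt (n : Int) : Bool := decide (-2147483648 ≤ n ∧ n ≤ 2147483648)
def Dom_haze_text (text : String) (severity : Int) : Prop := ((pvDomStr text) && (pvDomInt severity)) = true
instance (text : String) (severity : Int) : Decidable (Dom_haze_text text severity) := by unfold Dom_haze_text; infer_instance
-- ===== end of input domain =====

-- B replaces A's interleaved countdown-and-build loop by locate-boundary-then-splice (alternative decomposition).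


-- ===== PORT A =====
-- one loop over the characters, appending '.' or the char while decrementing severity
def hazeAStep (st : List Char × Int) (char : Char) : List Char × Int :=
  if PySem.Chars.isalpha char && decide (st.2 > 0) then (st.1 ++ ['.'], st.2 - 1)
  else (st.1 ++ [char], st.2)

def haze_text (text : String) (severity : Int) : String :=
  String.mk (text.toList.foldl hazeAStep ([], severity)).1

-- ===== PORT B =====
-- first pass: index just past the severity-th letter (or the length if the counter never reaches 0)
def hazeBoundary : List Char → Nat → Int → Nat
  | [], i, _ => i
  | c :: rest, i, remaining =>
    if PySem.Chars.isalpha c then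
      if remaining - 1 = 0 then i + 1 else hazeBoundary rest (i + 1) (remaining - 1)
    else hazeBoundary rest (i + 1) remaining

def haze_text_alt (text : String) (severity : Int) : String :=
  let cs := text.toList
  let boundary := if severity ≤ 0 then 0 else hazeBoundary cs 0 severity
  String.mk ((cs.take boundary).map (fun c => if PySem.Chars.isalpha c then '.' else c)
             ++ cs.drop boundary)

-- ===== PRECONDITION & SPEC =====
def Spec_haze_text (text : String) (severity : Int) (out : String) : Prop := out = haze_text_alt text severity
instance (text : String) (severity : Int) (out : String) : Decidable (Spec_haze_text text severity out) := by unfold Spec_haze_text; infer_instance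

-- ===== CLAIM (what is proved, stated in full; the proofs are below) =====
def Claim_equal_haze_text : Prop := ∀ (text : String) (severity : Int), Dom_haze_text text severity → Spec_haze_text text severity (haze_text text severity)

-- ===== LEMMAS AND PROOFS =====

-- A's loop without the accumulator, as a structural recursion
def hazeRec : List Char → Int → List Char
  | [], _ => []
  | c :: cs, s =>
    if PySem.Chars.isalpha c && decide (s > 0) then '.' :: hazeRec cs (s - 1)
    else c :: hazeRec cs s

theorem foldl_hazeA (cs : List Char) : ∀ (acc : List Char) (s : Int),
    (cs.foldl hazeAStep (acc, s)).1 = acc ++ hazeRec cs s := by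
  induction cs with
  | nil => intro acc s; simp [hazeRec]
  | cons c cs ih =>
    intro acc s
    simp only [List.foldl_cons, hazeAStep, hazeRec]
    by_cases h : (PySem.Chars.isalpha c && decide (s > 0)) = true
    · simp [h, ih]
    · simp [h, ih]

theorem hazeRec_nonpos (cs : List Char) : ∀ s : Int, s ≤ 0 → hazeRec cs s = cs := by
  induction cs with
  | nil => intro s _; simp [hazeRec]
  | cons c cs ih =>
    intro s hs
    have : ¬ (s > 0) := by omega
    simp [hazeRec, this, ih s hs]

theorem hazeBoundary_shift (cs : List Char) : ∀ (i : Nat) (r : Int),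
    hazeBoundary cs i r = i + hazeBoundary cs 0 r := by
  induction cs with
  | nil => intro i r; simp [hazeBoundary]
  | cons c cs ih =>
    intro i r
    simp only [hazeBoundary]
    by_cases hc : PySem.Chars.isalpha c = true
    · by_cases hr : r - 1 = 0
      · simp [hc, hr]
      · simp [hc, hr, ih (i + 1), ih 1]; omega
    · simp [hc, ih (i + 1), ih 1]; omega

theorem hazeRec_splice (cs : List Char) : ∀ s : Int, 0 < s →
    hazeRec cs s =
      (cs.take (hazeBoundary cs 0 s)).map (fun c => if PySem.Chars.isalpha c then '.' else c)
        ++ cs.drop (hazeBoundary cs 0 s) := by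
  induction cs with
  | nil => intro s _; simp [hazeRec, hazeBoundary]
  | cons c cs ih =>
    intro s hs
    by_cases hc : PySem.Chars.isalpha c = true
    · by_cases hr : s - 1 = 0
      · have hs1 : s = 1 := by omega
        simp [hazeRec, hazeBoundary, hc, hs1, hazeRec_nonpos cs 0 (le_refl 0)]
      · have hpos : 0 < s - 1 := by omega
        simp only [hazeRec, hazeBoundary, hc, hr, if_true, if_false,
          hazeBoundary_shift cs 1 (s - 1), Nat.add_comm 1]
        simp [List.take_succ_cons, List.drop_succ_cons, hc, hs, ih (s - 1) hpos]
    · simp only [hazeRec, hazeBoundary, hc, hazeBoundary_shift cs 1 s, Nat.add_comm 1]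
      simp [List.take_succ_cons, List.drop_succ_cons, hc, ih s hs]

-- ===== VERDICT (by name: the statement is the Claim_ definition above) =====
theorem haze_text_spec : Claim_equal_haze_text := by
  intro text severity _
  unfold Spec_haze_text haze_text haze_text_alt
  rw [foldl_hazeA text.toList [] severity]
  by_cases h : severity ≤ 0
  · simp [h, hazeRec_nonpos text.toList severity h]
  · have hpos : 0 < severity := by omega
    simp [h, hazeRec_splice text.toList severity hpos]
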